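-- pv_equiv track=rewrite | github.com/lbliii/kida | src/kida/analysis/type_checker.py | _suggest_typo
-- ===== SOURCE A (Python) =====
-- def _suggest_typo(name: str, candidates: list[str]) -> str | None:
--     """Suggest a declared name if the given name looks like a typo."""
--     if not candidates:
--         return None
--     # Simple edit distance check (1 char difference)
--     for candidate in candidates:
--         if abs(len(name) - len(candidate)) <= 2:
--             # Check prefix match (common typo: extra/missing char)
--             if name.startswith(candidate[:3]) or candidate.startswith(name[:3]):
--                 return candidate
--             # Check Levenshtein distance = 1
--             if _edit_distance_one(name, candidate):
--                 return candidate
--     return None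
--
-- def _edit_distance_one(a: str, b: str) -> bool:
--     """Check if two strings have edit distance <= 1."""
--     if abs(len(a) - len(b)) > 1:
--         return False
--     if len(a) == len(b):
--         diffs = sum(1 for x, y in zip(a, b, strict=False) if x != y)
--         return diffs == 1
--     # Insertion/deletion
--     short, long = (a, b) if len(a) < len(b) else (b, a)
--     j = 0
--     diffs = 0
--     for i in range(len(long)):
--         if j < len(short) and long[i] == short[j]:
--             j += 1
--         else:
--             diffs += 1
--     return diffs <= 1
-- ===== SOURCE B (Python) =====
-- def _suggest_typo(name: str, candidates: list[str]) -> str | None: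
--     """Suggest a declared name if the given name looks like a typo."""
--     return next((c for c in candidates if _is_typo_match(name, c)), None)
--
-- def _is_typo_match(name: str, candidate: str) -> bool:
--     if abs(len(name) - len(candidate)) > 2:
--         return False
--     if name.startswith(candidate[:3]) or candidate.startswith(name[:3]):
--         return True
--     return _edit_distance_one(name, candidate)
--
-- def _edit_distance_one(a: str, b: str) -> bool:
--     """Edit distance <= 1 via longest-common-prefix stripping."""
--     if abs(len(a) - len(b)) > 1:
--         return False
--     p = 0
--     while p < len(a) and p < len(b) and a[p] == b[p]:
--         p += 1
--     if len(a) == len(b):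
--         # exactly one substitution: mismatch at p, suffixes after p equal
--         return p < len(a) and a[p + 1:] == b[p + 1:]
--     short, long = (a, b) if len(a) < len(b) else (b, a)
--     # one deletion from long: drop long[p], suffixes must line up
--     return long[p + 1:] == short[p:]
-- ===== Notes on version B (the rewrite author's own statement) =====
-- stated objective: alternative
-- what changed: _edit_distance_one is rewritten as a longest-common-prefix scan followed by a single suffix comparison (one substitution: mismatch at p and equal tails; one deletion: long[p+1:]==short[p:]) instead of A's mismatch-counting folds, and the outer early-return loop becomes a find-first over a predicate.
import Mathlib
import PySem

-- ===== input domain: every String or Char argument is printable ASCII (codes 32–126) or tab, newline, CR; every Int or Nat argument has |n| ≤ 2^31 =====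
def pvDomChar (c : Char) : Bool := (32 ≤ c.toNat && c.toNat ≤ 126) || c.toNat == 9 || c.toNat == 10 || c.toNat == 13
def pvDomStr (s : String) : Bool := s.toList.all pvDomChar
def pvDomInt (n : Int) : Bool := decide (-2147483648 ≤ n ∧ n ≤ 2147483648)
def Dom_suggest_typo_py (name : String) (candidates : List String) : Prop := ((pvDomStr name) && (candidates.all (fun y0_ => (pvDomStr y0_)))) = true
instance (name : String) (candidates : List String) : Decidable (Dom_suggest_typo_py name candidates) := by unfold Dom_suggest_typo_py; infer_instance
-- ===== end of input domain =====

-- B replaces A's two mismatch-counting folds in _edit_distance_one by a longest-common-prefix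
-- scan followed by one suffix comparison, and A's early-return candidate loop by a find-first
-- over a predicate (objective: alternative decomposition, same asymptotic cost).

-- ===== PORT A =====
-- _edit_distance_one from Source A: greedy single-pass mismatch count over indices of the longer string
def edit_distance_one (a b : String) : Bool :=
  if (PySem.Str.len a - PySem.Str.len b).natAbs > 1 then false
  else if PySem.Str.len a == PySem.Str.len b then
    ((a.toList.zip b.toList).foldl (fun n p => if p.1 ≠ p.2 then n + 1 else n) (0 : Int)) == 1
  else
    let sl := if PySem.Str.len a < PySem.Str.len b then (a, b) else (b, a)
    let st := (PySem.List.pyRange 0 (PySem.Str.len sl.2)).foldl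
      (fun (st : Int × Int) i =>
        if st.1 < PySem.Str.len sl.1 ∧ PySem.Str.pyGet? sl.2 i = PySem.Str.pyGet? sl.1 st.1
        then (st.1 + 1, st.2) else (st.1, st.2 + 1)) (0, 0)
    decide (st.2 ≤ 1)

-- the for-loop of _suggest_typo with its early returns
def suggestGoA (name : String) : List String → Option String
  | [] => none
  | c :: rest =>
    if (PySem.Str.len name - PySem.Str.len c).natAbs ≤ 2 then
      if PySem.Str.startswith name (PySem.Str.slice c none (some 3))
         || PySem.Str.startswith c (PySem.Str.slice name none (some 3)) then some c
      else if edit_distance_one name c then some c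
      else suggestGoA name rest
    else suggestGoA name rest

def suggest_typo_py (name : String) (candidates : List String) : Option String :=
  if candidates.isEmpty then none else suggestGoA name candidates

-- ===== PORT B =====
-- the `while` loop of Source B's _edit_distance_one: length of the longest common prefix
def commonPrefixLen : List Char → List Char → Nat
  | x :: xs, y :: ys => if x = y then commonPrefixLen xs ys + 1 else 0
  | _, _ => 0

-- _edit_distance_one from Source B: strip the common prefix, then one suffix comparison
def edit_distance_one_alt (a b : String) : Bool :=
  let la := a.toList
  let lb := b.toList
  if la.length + 1 < lb.length ∨ lb.length + 1 < la.length then false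
  else
    let p := commonPrefixLen la lb
    if la.length = lb.length then
      decide (p < la.length) && (la.drop (p + 1) == lb.drop (p + 1))
    else
      let sl := if la.length < lb.length then (la, lb) else (lb, la)
      sl.2.drop (p + 1) == sl.1.drop p

def is_typo_match_alt (name c : String) : Bool :=
  let ln := name.toList
  let lc := c.toList
  if ln.length + 2 < lc.length ∨ lc.length + 2 < ln.length then false
  else if (lc.take 3).isPrefixOf ln || (ln.take 3).isPrefixOf lc then true
  else edit_distance_one_alt name c

def suggest_typo_py_alt (name : String) (candidates : List String) : Option String :=
  candidates.find? (fun c => is_typo_match_alt name c)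

-- ===== PRECONDITION & SPEC =====
def Spec_suggest_typo_py (name : String) (candidates : List String) (out : Option String) : Prop := out = suggest_typo_py_alt name candidates
instance (name : String) (candidates : List String) (out : Option String) : Decidable (Spec_suggest_typo_py name candidates out) := by unfold Spec_suggest_typo_py; infer_instance

-- ===== CLAIM (what is proved, stated in full; the proofs are below) =====
def Claim_equal_suggest_typo_py : Prop := ∀ (name : String) (candidates : List String), Dom_suggest_typo_py name candidates → Spec_suggest_typo_py name candidates (suggest_typo_py name candidates)

-- ===== LEMMAS AND PROOFS =====

theorem commonPrefixLen_comm : ∀ (xs ys : List Char), commonPrefixLen xs ys = commonPrefixLen ys xs := by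
  intro xs
  induction xs with
  | nil => intro ys; cases ys <;> rfl
  | cons x xs ih =>
    intro ys
    cases ys with
    | nil => rfl
    | cons y ys =>
      by_cases h : x = y
      · subst h; simp [commonPrefixLen, ih]
      · simp only [commonPrefixLen, if_neg h, if_neg (fun hyx : y = x => h hyx.symm)]

-- (matched, skipped) counts of A's greedy walk, as structural recursion on the longer string
def grm : List Char → List Char → Nat × Nat
  | [], _ => (0, 0)
  | _ :: L, [] => ((grm L []).1, (grm L []).2 + 1)
  | x :: L, y :: S =>
    if x = y then ((grm L S).1 + 1, (grm L S).2)
    else ((grm L (y :: S)).1, (grm L (y :: S)).2 + 1)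

-- if ss is a subsequence of ls, the greedy walk matches all of it
theorem grm_sub : ∀ (ls ss : List Char), ss.Sublist ls → (grm ls ss).2 + ss.length = ls.length := by
  intro ls
  induction ls with
  | nil => intro ss h; simp [List.sublist_nil.mp h, grm]
  | cons x L ih =>
    intro ss h
    cases ss with
    | nil => have := ih [] (List.nil_sublist L); simp only [grm, List.length_cons, List.length_nil] at this ⊢; omega
    | cons y S =>
      by_cases hxy : x = y
      · subst hxy
        have := ih S (List.cons_sublist_cons.mp h)
        simp only [grm, if_true, List.length_cons]; omega
      · have hs : (y :: S).Sublist L := by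
          cases h with
          | cons _ h' => exact h'
          | cons₂ => exact absurd rfl hxy
        have := ih _ hs
        simp only [grm, if_neg hxy, List.length_cons] at this ⊢; omega

-- conversely, few enough skips force ss to be a subsequence
theorem grm_conv : ∀ (ls ss : List Char), (grm ls ss).2 + ss.length ≤ ls.length → ss.Sublist ls := by
  intro ls
  induction ls with
  | nil => intro ss h; simp [grm] at h; simp [h]
  | cons x L ih =>
    intro ss h
    cases ss with
    | nil => exact List.nil_sublist _
    | cons y S =>
      by_cases hxy : x = y
      · subst hxy
        simp [grm] at h
        exact List.cons_sublist_cons.mpr (ih S (by omega))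
      · simp [grm, hxy] at h
        exact (ih (y :: S) (by simp; omega)).cons x

-- with a length gap of one, ss is a subsequence of ls iff dropping ls's char right after the
-- longest common prefix makes the suffixes line up (B's deletion test)
theorem sub_iff_prefix_drop : ∀ (ls ss : List Char), ls.length = ss.length + 1 →
    (ss.Sublist ls ↔ ls.drop (commonPrefixLen ls ss + 1) = ss.drop (commonPrefixLen ls ss)) := by
  intro ls
  induction ls with
  | nil => intro ss h; simp at h
  | cons x L ih =>
    intro ss h
    cases ss with
    | nil =>
      have hL : L = [] := by simpa using h
      subst hL
      simp [commonPrefixLen]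
    | cons y S =>
      by_cases hxy : x = y
      · subst hxy
        have hlen : L.length = S.length + 1 := by simp at h; omega
        simp only [commonPrefixLen]
        rw [List.cons_sublist_cons]
        have := ih S hlen
        simpa using this
      · simp only [commonPrefixLen, if_neg hxy, List.drop_succ_cons, List.drop_zero, List.drop_zero]
        constructor
        · intro hsub
          have hs : (y :: S).Sublist L := by
            cases hsub with
            | cons _ h' => exact h'
            | cons₂ => exact absurd rfl hxy
          have hlen : (y :: S).length = L.length := by simp at h ⊢; omega
          exact (List.Sublist.eq_of_length hs hlen).symm
        · intro heq
          rw [← heq]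
          exact (List.Sublist.refl _).cons x

-- A's loop body over the characters of the longer string computes grm
theorem fold_grm (ss : List Char) : ∀ (ls : List Char) (j : Nat) (d : Int),
    ls.foldl (fun (st : Int × Int) (c : Char) =>
      if st.1 < (ss.length : Int) ∧ some c = PySem.List.pyGet? ss st.1
      then (st.1 + 1, st.2) else (st.1, st.2 + 1)) ((j : Int), d)
    = ((j : Int) + ((grm ls (ss.drop j)).1 : Int), d + ((grm ls (ss.drop j)).2 : Int)) := by
  intro ls
  induction ls with
  | nil => intro j d; simp [grm]
  | cons x L ih =>
    intro j d
    rw [List.foldl_cons]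
    by_cases hj : j < ss.length
    · have hdrop : ss.drop j = ss[j] :: ss.drop (j + 1) := (List.getElem_cons_drop hj).symm
      by_cases hx : x = ss[j]
      · have hcond : ((j : Int) < (ss.length : Int) ∧ some x = PySem.List.pyGet? ss (j : Int)) := by
          constructor
          · exact_mod_cast hj
          · simp [hx, List.getElem?_eq_getElem hj]
        rw [if_pos hcond]
        have : ((j : Int) + 1, d) = (((j + 1 : Nat) : Int), d) := by push_cast; rfl
        rw [this, ih (j + 1) d, hdrop]
        simp [grm, hx]
        omega
      · have hcond : ¬ ((j : Int) < (ss.length : Int) ∧ some x = PySem.List.pyGet? ss (j : Int)) := by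
          simp [List.getElem?_eq_getElem hj]
          intro _; exact fun h => hx h
        rw [if_neg hcond, ih j (d + 1), hdrop]
        simp [grm, hx]
        ring
    · have hdrop : ss.drop j = [] := List.drop_eq_nil_of_le (by omega)
      have hcond : ¬ ((j : Int) < (ss.length : Int) ∧ some x = PySem.List.pyGet? ss (j : Int)) := by
        intro h; exact hj (by exact_mod_cast h.1)
      rw [if_neg hcond, ih j (d + 1), hdrop]
      simp [grm]
      ring

-- A's range-indexed loop, bridged to the list fold above
theorem foldA_eq (l s : String) :
    (PySem.List.pyRange 0 (PySem.Str.len l)).foldl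
      (fun (st : Int × Int) i =>
        if st.1 < PySem.Str.len s ∧ PySem.Str.pyGet? l i = PySem.Str.pyGet? s st.1
        then (st.1 + 1, st.2) else (st.1, st.2 + 1)) (0, 0)
    = (((grm l.toList s.toList).1 : Int), ((grm l.toList s.toList).2 : Int)) := by
  have h1 : (PySem.List.pyRange 0 (PySem.Str.len l)).foldl
      (fun (st : Int × Int) i =>
        if st.1 < PySem.Str.len s ∧ PySem.Str.pyGet? l i = PySem.Str.pyGet? s st.1
        then (st.1 + 1, st.2) else (st.1, st.2 + 1)) (0, 0)
    = (PySem.List.pyRange 0 ((l.toList.length : Int))).foldl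
      (fun (st : Int × Int) i =>
        (fun (st : Int × Int) (c : Char) =>
          if st.1 < (s.toList.length : Int) ∧ some c = PySem.List.pyGet? s.toList st.1
          then (st.1 + 1, st.2) else (st.1, st.2 + 1)) st (PySem.List.pyGetD l.toList i 'a')) (0, 0) := by
    rw [PySem.Str.len_eq]
    apply PySem.List.foldl_congr_mem
    intro acc i hi
    obtain ⟨h0, hlt⟩ := PySem.List.mem_pyRange_one.mp hi
    have hlt' : i < (l.toList.length : Int) := by simpa using hlt
    have hget : PySem.Str.pyGet? l i = some (PySem.List.pyGetD l.toList i 'a') := by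
      rw [PySem.List.pyGetD_eq_getElem l.toList 'a' h0 hlt']
      simp [PySem.List.pyGet?_of_nonneg _ h0, List.getElem?_eq_getElem (by omega : i.toNat < l.toList.length)]
    simp only [hget, PySem.Str.pyGet?_eq, PySem.Chars.pyGet?_eq_listPyGet?]
  rw [h1, PySem.List.foldl_pyRange_zero_pyGetD' l.toList 'a'
        (fun (st : Int × Int) (c : Char) =>
          if st.1 < (s.toList.length : Int) ∧ some c = PySem.List.pyGet? s.toList st.1
          then (st.1 + 1, st.2) else (st.1, st.2 + 1)) (0, 0)]
  simpa using fold_grm s.toList l.toList 0 0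

-- A's mismatch-counting fold is a countP
theorem fold_countP : ∀ (l : List (Char × Char)) (n : Int),
    l.foldl (fun n p => if p.1 ≠ p.2 then n + 1 else n) n
    = n + (l.countP (fun p => decide (p.1 ≠ p.2)) : Int) := by
  intro l
  induction l with
  | nil => intro n; simp
  | cons q l ih =>
    intro n
    rw [List.foldl_cons, List.countP_cons]
    by_cases h : q.1 = q.2
    · rw [if_neg (by simp [h]), ih n, if_neg (by simp [h])]
      simp
    · rw [if_pos (by simp [h]), ih (n + 1), if_pos (by simp [h])]
      push_cast
      ring

-- zero mismatches over equal lengths means equality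
theorem countP_zero : ∀ (xs ys : List Char), xs.length = ys.length →
    (((xs.zip ys).countP (fun p => decide (p.1 ≠ p.2)) = 0) ↔ xs = ys) := by
  intro xs
  induction xs with
  | nil => intro ys h; cases ys with
    | nil => simp
    | cons y ys => simp at h
  | cons x xs ih =>
    intro ys h
    cases ys with
    | nil => simp at h
    | cons y ys =>
      rw [List.zip_cons_cons, List.countP_cons]
      by_cases hxy : x = y
      · subst hxy
        rw [if_neg (by simp), Nat.add_zero]
        rw [ih ys (by simpa using h)]
        simp
      · rw [if_pos (by simp [hxy])]
        simp [hxy]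

-- exactly one mismatch over equal lengths ⟺ mismatch at the common-prefix end, equal tails
theorem countP_one : ∀ (xs ys : List Char), xs.length = ys.length →
    (((xs.zip ys).countP (fun p => decide (p.1 ≠ p.2)) = 1)
      ↔ commonPrefixLen xs ys < xs.length
        ∧ xs.drop (commonPrefixLen xs ys + 1) = ys.drop (commonPrefixLen xs ys + 1)) := by
  intro xs
  induction xs with
  | nil => intro ys h; cases ys with
    | nil => simp [commonPrefixLen]
    | cons y ys => simp at h
  | cons x xs ih =>
    intro ys h
    cases ys with
    | nil => simp at h
    | cons y ys =>
      by_cases hxy : x = y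
      · subst hxy
        have := ih ys (by simpa using h)
        simp only [List.zip_cons_cons, List.countP_cons, commonPrefixLen,
          List.drop_succ_cons, List.length_cons]
        simpa [Nat.succ_lt_succ_iff] using this
      · simp only [List.zip_cons_cons, List.countP_cons, commonPrefixLen, if_neg hxy,
          List.drop_succ_cons, List.length_cons, decide_eq_true_eq]
        rw [if_pos hxy]
        constructor
        · intro hc
          have h0 : (xs.zip ys).countP (fun p => decide (p.1 ≠ p.2)) = 0 := by omega
          exact ⟨by omega, by simpa using (countP_zero xs ys (by simpa using h)).mp h0⟩
        · rintro ⟨-, htail⟩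
          have : xs = ys := by simpa using htail
          have := (countP_zero xs ys (by simpa using h)).mpr this
          omega

-- the `name.startswith(candidate[:3])` test equals B's take-3 isPrefixOf
theorem startswith_take3 (s t : String) :
    PySem.Str.startswith s (PySem.Str.slice t none (some 3))
      = (t.toList.take 3).isPrefixOf s.toList := by
  rw [Bool.eq_iff_iff, List.isPrefixOf_iff_prefix]
  rw [PySem.Str.startswith_eq, PySem.Str.toList_slice, PySem.Chars.slice_eq_listSlice,
      PySem.List.slice_to _ (by omega : (0:Int) ≤ 3)]
  have h3 : (3 : Int).toNat = 3 := rfl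
  rw [h3]
  exact PySem.Chars.startswith_iff _ _

-- the two _edit_distance_one implementations agree
theorem helper_eq (a b : String) : edit_distance_one a b = edit_distance_one_alt a b := by
  have hlenA : PySem.Str.len a = (a.toList.length : Int) := by simp
  have hlenB : PySem.Str.len b = (b.toList.length : Int) := by simp
  unfold edit_distance_one edit_distance_one_alt
  by_cases h1 : a.toList.length + 1 < b.toList.length ∨ b.toList.length + 1 < a.toList.length
  · rw [if_pos (show (PySem.Str.len a - PySem.Str.len b).natAbs > 1 by
      rw [hlenA, hlenB]; omega), if_pos h1]
  · rw [if_neg (show ¬ (PySem.Str.len a - PySem.Str.len b).natAbs > 1 by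
      rw [hlenA, hlenB]; omega), if_neg h1]
    by_cases h2 : a.toList.length = b.toList.length
    · rw [if_pos (show (PySem.Str.len a == PySem.Str.len b) = true by
        rw [hlenA, hlenB]; exact beq_iff_eq.mpr (by exact_mod_cast h2)), if_pos h2]
      rw [Bool.eq_iff_iff, beq_iff_eq, fold_countP, Bool.and_eq_true, beq_iff_eq,
          decide_eq_true_eq]
      have hco := countP_one a.toList b.toList h2
      constructor
      · intro hc; exact hco.mp (by omega)
      · intro hc; have := hco.mpr hc; omega
    · rw [if_neg (show ¬ (PySem.Str.len a == PySem.Str.len b) = true by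
        rw [hlenA, hlenB]; simpa using fun hh => h2 (by exact_mod_cast hh)), if_neg h2]
      by_cases hab : a.toList.length < b.toList.length
      · have habS : PySem.Str.len a < PySem.Str.len b := by
          rw [hlenA, hlenB]; exact_mod_cast hab
        simp only [if_pos habS, if_pos hab]
        rw [foldA_eq b a]
        have hlen : b.toList.length = a.toList.length + 1 := by omega
        rw [Bool.eq_iff_iff, decide_eq_true_eq, beq_iff_eq]
        have hsub := sub_iff_prefix_drop b.toList a.toList hlen
        rw [commonPrefixLen_comm a.toList b.toList]
        constructor
        · intro hle
          exact hsub.mp (grm_conv _ _ (by omega))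
        · intro hdrop
          have := grm_sub _ _ (hsub.mpr hdrop)
          omega
      · have habS : ¬ PySem.Str.len a < PySem.Str.len b := by
          rw [hlenA, hlenB]; exact_mod_cast hab
        simp only [if_neg habS, if_neg hab]
        rw [foldA_eq a b]
        have hlen : a.toList.length = b.toList.length + 1 := by omega
        rw [Bool.eq_iff_iff, decide_eq_true_eq, beq_iff_eq]
        have hsub := sub_iff_prefix_drop a.toList b.toList hlen
        constructor
        · intro hle
          exact hsub.mp (grm_conv _ _ (by omega))
        · intro hdrop
          have := grm_sub _ _ (hsub.mpr hdrop)
          omega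

-- A's loop with early returns is B's find-first over the predicate
theorem go_eq (name : String) : ∀ cs, suggestGoA name cs = cs.find? (fun c => is_typo_match_alt name c) := by
  intro cs
  induction cs with
  | nil => simp [suggestGoA]
  | cons c rest ih =>
    unfold suggestGoA
    have hlen : (PySem.Str.len name - PySem.Str.len c).natAbs ≤ 2
        ↔ ¬ (name.toList.length + 2 < c.toList.length ∨ c.toList.length + 2 < name.toList.length) := by
      simp only [PySem.Str.len_eq]
      omega
    by_cases hg : (PySem.Str.len name - PySem.Str.len c).natAbs ≤ 2
    · by_cases hp : (PySem.Str.startswith name (PySem.Str.slice c none (some 3))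
         || PySem.Str.startswith c (PySem.Str.slice name none (some 3))) = true
      · have hpred : is_typo_match_alt name c = true := by
          unfold is_typo_match_alt
          rw [if_neg (hlen.mp hg), if_pos (by rwa [← startswith_take3, ← startswith_take3])]
        rw [if_pos hg, if_pos hp, List.find?_cons_of_pos hpred]
      · by_cases he : edit_distance_one name c = true
        · have hpred : is_typo_match_alt name c = true := by
            unfold is_typo_match_alt
            rw [if_neg (hlen.mp hg), if_neg (by rwa [← startswith_take3, ← startswith_take3]),
                ← helper_eq]
            exact he
          rw [if_pos hg, if_neg hp, if_pos he, List.find?_cons_of_pos hpred]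
        · have hpred : ¬ is_typo_match_alt name c = true := by
            unfold is_typo_match_alt
            rw [if_neg (hlen.mp hg), if_neg (by rwa [← startswith_take3, ← startswith_take3]),
                ← helper_eq]
            exact he
          rw [if_pos hg, if_neg hp, if_neg he, List.find?_cons_of_neg hpred, ih]
    · have hpred : ¬ is_typo_match_alt name c = true := by
        unfold is_typo_match_alt
        rw [if_pos (by by_contra hh; exact hg (hlen.mpr hh))]
        simp
      rw [if_neg hg, List.find?_cons_of_neg hpred, ih]

-- ===== VERDICT (by name: the statement is the Claim_ definition above) =====
theorem suggest_typo_py_spec : Claim_equal_suggest_typo_py := by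
  intro name candidates _
  unfold Spec_suggest_typo_py suggest_typo_py suggest_typo_py_alt
  cases candidates with
  | nil => simp
  | cons c rest => simpa using go_eq name (c :: rest)
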